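-- pv_equiv track=rewrite | github.com/elkhaligy/LeetCode | 2. Medium/(9) Sep 2024/2. 874. Walking Robot Simulation/874. Walking Robot Simulation.py | robotSim_Refactoring
-- ===== SOURCE A (Python) =====
-- def robotSim_Refactoring(commands: list[int], obstacles: list[list[int]]) -> int:
--     directions = [(0, 1), (1, 0), (0, -1), (-1, 0)]  # ['N', 'E', 'S', 'W']
--     cur_dir = 0
--     x, y = 0, 0
--     furthest = 0
--     obstacles_map = {}
--
--     for obstacle in obstacles:
--         x_obstacle, y_obstacle = obstacle[0], obstacle[1]
--         obstacles_map[(x_obstacle, y_obstacle)] = 1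
--
--     for command in commands:
--         if command == -1:
--             cur_dir = (cur_dir + 1) % 4
--         elif command == -2:
--             cur_dir = (cur_dir - 1) % 4
--         else:
--             for _ in range(command):
--                 x_new, y_new = x + directions[cur_dir][0], y + directions[cur_dir][1]
--                 if (x_new, y_new) in obstacles_map:
--                     break
--                 x, y = x_new, y_new
--
--             furthest = max(furthest, x ** 2 + y ** 2)
--
--     return furthest
-- ===== SOURCE B (Python) =====
-- def robotSim_Refactoring(commands: list[int], obstacles: list[list[int]]) -> int:
--     # Group obstacles by column and by row once; for each forward command scan only
--     # the obstacles on the line of travel for the nearest blocker and jump directly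
--     # to the stopping cell, instead of walking cell by cell with a hash probe per step.
--     directions = [(0, 1), (1, 0), (0, -1), (-1, 0)]  # ['N', 'E', 'S', 'W']
--     by_col = {}  # x -> list of y's of obstacles in that column
--     by_row = {}  # y -> list of x's of obstacles in that row
--     for obstacle in obstacles:
--         ox, oy = obstacle[0], obstacle[1]
--         by_col.setdefault(ox, []).append(oy)
--         by_row.setdefault(oy, []).append(ox)
--
--     cur_dir = 0
--     x, y = 0, 0
--     furthest = 0
--     for command in commands:
--         if command == -1:
--             cur_dir = (cur_dir + 1) % 4
--         elif command == -2:
--             cur_dir = (cur_dir - 1) % 4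
--         else:
--             dx, dy = directions[cur_dir]
--             step = command
--             if dx == 0:
--                 for oy in by_col.get(x, []):
--                     t = (oy - y) * dy
--                     if t >= 1 and t - 1 < step:
--                         step = t - 1
--             else:
--                 for ox in by_row.get(y, []):
--                     t = (ox - x) * dx
--                     if t >= 1 and t - 1 < step:
--                         step = t - 1
--             if step > 0:
--                 x += dx * step
--                 y += dy * step
--             furthest = max(furthest, x * x + y * y)
--     return furthest
-- ===== Notes on version B (the rewrite author's own statement) =====
-- stated objective: alternative
-- what changed: B groups the obstacles once into two dicts (column -> y's, row -> x's) and handles each forward command by scanning only the obstacles on the line of travel for the nearest blocker, jumping straight to the stopping cell, instead of A's cell-by-cell walk with a hash probe per unit step.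
import Mathlib
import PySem

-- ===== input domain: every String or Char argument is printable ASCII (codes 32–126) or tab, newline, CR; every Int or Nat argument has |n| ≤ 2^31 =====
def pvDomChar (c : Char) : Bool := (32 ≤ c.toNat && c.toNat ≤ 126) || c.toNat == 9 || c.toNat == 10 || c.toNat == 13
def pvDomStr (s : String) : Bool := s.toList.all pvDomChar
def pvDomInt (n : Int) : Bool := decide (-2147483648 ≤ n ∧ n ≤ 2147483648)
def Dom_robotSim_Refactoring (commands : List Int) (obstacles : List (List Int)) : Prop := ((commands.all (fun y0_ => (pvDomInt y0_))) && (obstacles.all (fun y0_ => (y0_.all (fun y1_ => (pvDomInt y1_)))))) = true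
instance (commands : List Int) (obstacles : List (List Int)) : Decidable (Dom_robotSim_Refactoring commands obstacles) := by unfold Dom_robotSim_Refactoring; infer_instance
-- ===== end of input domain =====

-- B groups obstacles by column and by row into dicts once; each forward command scans only
-- the obstacles on its line of travel for the nearest blocker and jumps straight to the
-- stopping cell, instead of A's cell-by-cell walk with a hash probe per unit step.

-- ===== PORT A =====
-- the inner 'for _ in range(command): … break' loop of A, fuel = number of iterations
def pvWalkA (obsMap : PySem.Dict (Int × Int) Int) (dx dy : Int) : Nat → Int → Int → Int × Int
  | 0, x, y => (x, y)
  | Nat.succ k, x, y =>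
    let xNew := x + dx
    let yNew := y + dy
    if obsMap.contains (xNew, yNew) then (x, y)
    else pvWalkA obsMap dx dy k xNew yNew

def robotSim_Refactoring (commands : List Int) (obstacles : List (List Int)) : Int :=
  let directions : List (Int × Int) := [(0, 1), (1, 0), (0, -1), (-1, 0)]
  let obstaclesMap : PySem.Dict (Int × Int) Int :=
    obstacles.foldl (fun m obstacle =>
      let xObstacle := PySem.List.pyGetD obstacle 0 0
      let yObstacle := PySem.List.pyGetD obstacle 1 0
      m.insert (xObstacle, yObstacle) 1) PySem.Dict.empty
  let st : Int × Int × Int × Int :=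
    commands.foldl (fun st command =>
      let (curDir, x, y, furthest) := st
      if command = -1 then (PySem.Int.mod (curDir + 1) 4, x, y, furthest)
      else if command = -2 then (PySem.Int.mod (curDir - 1) 4, x, y, furthest)
      else
        let d := PySem.List.pyGetD directions curDir (0, 0)
        let p := pvWalkA obstaclesMap d.1 d.2 command.toNat x y
        (curDir, p.1, p.2, max furthest (p.1 ^ 2 + p.2 ^ 2))) (0, 0, 0, 0)
  st.2.2.2

-- ===== PORT B =====
def robotSim_Refactoring_alt (commands : List Int) (obstacles : List (List Int)) : Int :=
  let directions : List (Int × Int) := [(0, 1), (1, 0), (0, -1), (-1, 0)]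
  let grouped : PySem.Dict Int (List Int) × PySem.Dict Int (List Int) :=
    obstacles.foldl (fun g obstacle =>
      let ox := PySem.List.pyGetD obstacle 0 0
      let oy := PySem.List.pyGetD obstacle 1 0
      (g.1.modify ox [] (· ++ [oy]), g.2.modify oy [] (· ++ [ox])))
      (PySem.Dict.empty, PySem.Dict.empty)
  let byCol := grouped.1
  let byRow := grouped.2
  let st : Int × Int × Int × Int :=
    commands.foldl (fun st command =>
      let (curDir, x, y, furthest) := st
      if command = -1 then (PySem.Int.mod (curDir + 1) 4, x, y, furthest)
      else if command = -2 then (PySem.Int.mod (curDir - 1) 4, x, y, furthest)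
      else
        let d := PySem.List.pyGetD directions curDir (0, 0)
        let step :=
          if d.1 = 0 then
            (byCol.getD x []).foldl (fun step oy =>
              let t := (oy - y) * d.2
              if 1 ≤ t ∧ t - 1 < step then t - 1 else step) command
          else
            (byRow.getD y []).foldl (fun step ox =>
              let t := (ox - x) * d.1
              if 1 ≤ t ∧ t - 1 < step then t - 1 else step) command
        let x' := if 0 < step then x + d.1 * step else x
        let y' := if 0 < step then y + d.2 * step else y
        (curDir, x', y', max furthest (x' * x' + y' * y'))) (0, 0, 0, 0)
  st.2.2.2

-- ===== PRECONDITION & SPEC =====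
-- Pre_ excludes obstacles with fewer than two coordinates: A raises IndexError on obstacle[0]/obstacle[1] there (B does too).
def Pre_robotSim_Refactoring (commands : List Int) (obstacles : List (List Int)) : Prop :=
  ∀ o ∈ obstacles, 2 ≤ o.length
instance (commands : List Int) (obstacles : List (List Int)) : Decidable (Pre_robotSim_Refactoring commands obstacles) := by unfold Pre_robotSim_Refactoring; infer_instance

def pvWitness_robotSim_Refactoring : List Int × List (List Int) := ([4, -1, 3], [[2, 4]])

def Spec_robotSim_Refactoring (commands : List Int) (obstacles : List (List Int)) (out : Int) : Prop := out = robotSim_Refactoring_alt commands obstacles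
instance (commands : List Int) (obstacles : List (List Int)) (out : Int) : Decidable (Spec_robotSim_Refactoring commands obstacles out) := by unfold Spec_robotSim_Refactoring; infer_instance

-- ===== CLAIM (what is proved, stated in full; the proofs are below) =====
def Claim_equal_robotSim_Refactoring : Prop := ∀ (commands : List Int) (obstacles : List (List Int)), Dom_robotSim_Refactoring commands obstacles → Pre_robotSim_Refactoring commands obstacles → Spec_robotSim_Refactoring commands obstacles (robotSim_Refactoring commands obstacles)

-- ===== LEMMAS AND PROOFS =====

-- signed offset of obstacle o along the ray from (x,y) in direction (dx,dy); 0 when not aligned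
def pvHit (dx dy x y : Int) (o : List Int) : Int :=
  let ox := PySem.List.pyGetD o 0 0
  let oy := PySem.List.pyGetD o 1 0
  if dx = 0 then (if ox = x then (oy - y) * dy else 0)
  else (if oy = y then (ox - x) * dx else 0)

-- the four directions, abstractly
def pvDir (dx dy : Int) : Prop := (dx = 0 ∧ dy * dy = 1) ∨ (dy = 0 ∧ dx * dx = 1)

def pvStepF (obstacles : List (List Int)) (dx dy x y : Int) (c : Int) : Int :=
  obstacles.foldl (fun step o =>
    if 1 ≤ pvHit dx dy x y o ∧ pvHit dx dy x y o - 1 < step then pvHit dx dy x y o - 1 else step) c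

lemma pvFold_le (obstacles : List (List Int)) (dx dy x y c : Int) :
    obstacles.foldl (fun step o =>
      if 1 ≤ pvHit dx dy x y o ∧ pvHit dx dy x y o - 1 < step then pvHit dx dy x y o - 1 else step) c ≤ c := by
  induction obstacles generalizing c with
  | nil => exact le_refl c
  | cons o os ih =>
    simp only [List.foldl_cons]
    refine le_trans (ih _) ?_
    split_ifs <;> omega

lemma pvFold_nonneg (obstacles : List (List Int)) (dx dy x y c : Int) (hc : 0 ≤ c) :
    0 ≤ obstacles.foldl (fun step o =>
      if 1 ≤ pvHit dx dy x y o ∧ pvHit dx dy x y o - 1 < step then pvHit dx dy x y o - 1 else step) c := by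
  induction obstacles generalizing c with
  | nil => exact hc
  | cons o os ih =>
    simp only [List.foldl_cons]
    refine ih _ ?_
    split_ifs <;> omega

lemma pvFold_of_nonpos (obstacles : List (List Int)) (dx dy x y c : Int) (hc : c ≤ 0) :
    obstacles.foldl (fun step o =>
      if 1 ≤ pvHit dx dy x y o ∧ pvHit dx dy x y o - 1 < step then pvHit dx dy x y o - 1 else step) c = c := by
  induction obstacles generalizing c with
  | nil => rfl
  | cons o os ih =>
    simp only [List.foldl_cons]
    have h0 : (if 1 ≤ pvHit dx dy x y o ∧ pvHit dx dy x y o - 1 < c then pvHit dx dy x y o - 1 else c) = c := by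
      split_ifs <;> omega
    rw [h0]; exact ih _ hc

lemma pvFold_zero_of_hit1 (obstacles : List (List Int)) (dx dy x y c : Int) (hc : 0 ≤ c)
    (h : ∃ o ∈ obstacles, pvHit dx dy x y o = 1) :
    obstacles.foldl (fun step o =>
      if 1 ≤ pvHit dx dy x y o ∧ pvHit dx dy x y o - 1 < step then pvHit dx dy x y o - 1 else step) c = 0 := by
  induction obstacles generalizing c with
  | nil => simp at h
  | cons o os ih =>
    simp only [List.foldl_cons]
    rcases h with ⟨w, hw, hw1⟩
    rcases List.mem_cons.mp hw with hwo | hwos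
    · subst hwo
      have h0 : (if 1 ≤ pvHit dx dy x y w ∧ pvHit dx dy x y w - 1 < c then pvHit dx dy x y w - 1 else c) = 0 := by
        split_ifs <;> omega
      rw [h0]
      exact le_antisymm (pvFold_le os dx dy x y 0) (pvFold_nonneg os dx dy x y 0 (le_refl 0))
    · refine ih _ ?_ ⟨w, hwos, hw1⟩
      split_ifs <;> omega

lemma pvFold_shift (obstacles : List (List Int)) (dx dy x y c : Int) (hdir : pvDir dx dy)
    (h : ∀ o ∈ obstacles, pvHit dx dy x y o ≠ 1) :
    obstacles.foldl (fun step o =>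
      if 1 ≤ pvHit dx dy (x + dx) (y + dy) o ∧ pvHit dx dy (x + dx) (y + dy) o - 1 < step then pvHit dx dy (x + dx) (y + dy) o - 1 else step) c =
    obstacles.foldl (fun step o =>
      if 1 ≤ pvHit dx dy x y o ∧ pvHit dx dy x y o - 1 < step then pvHit dx dy x y o - 1 else step) (c + 1) - 1 := by
  induction obstacles generalizing c with
  | nil => simp
  | cons o os ih =>
    simp only [List.foldl_cons]
    have hne : pvHit dx dy x y o ≠ 1 := h o (List.mem_cons_self ..)
    have hshift : pvHit dx dy (x + dx) (y + dy) o = pvHit dx dy x y o - 1 ∨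
        (pvHit dx dy (x + dx) (y + dy) o = 0 ∧ pvHit dx dy x y o = 0) := by
      simp only [pvHit]
      rcases hdir with ⟨hdx, hdy⟩ | ⟨hdy, hdx⟩
      · subst hdx
        by_cases hox : PySem.List.pyGetD o 0 0 = x
        · left
          simp [hox]
          linear_combination -hdy
        · right
          simp [hox]
      · subst hdy
        have hz : ¬ dx = 0 := by intro h0; rw [h0] at hdx; simp at hdx
        by_cases hoy : PySem.List.pyGetD o 1 0 = y
        · left
          simp [hz, hoy]
          linear_combination -hdx
        · right
          simp [hz, hoy]
    have helem : (if 1 ≤ pvHit dx dy (x + dx) (y + dy) o ∧ pvHit dx dy (x + dx) (y + dy) o - 1 < c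
          then pvHit dx dy (x + dx) (y + dy) o - 1 else c)
        = (if 1 ≤ pvHit dx dy x y o ∧ pvHit dx dy x y o - 1 < c + 1
          then pvHit dx dy x y o - 1 else c + 1) - 1 := by
      rcases hshift with hs | ⟨hs1, hs2⟩
      · rw [hs]; split_ifs <;> omega
      · rw [hs1, hs2]; split_ifs <;> omega
    rw [helem, ih _ (fun o ho => h o (List.mem_cons_of_mem _ ho)), sub_add_cancel]

lemma pvContains_fold (obstacles : List (List Int)) (d : PySem.Dict (Int × Int) Int) (k : Int × Int) :
    (obstacles.foldl (fun m obstacle =>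
      m.insert (PySem.List.pyGetD obstacle 0 0, PySem.List.pyGetD obstacle 1 0) 1) d).contains k
    = (d.contains k || obstacles.any (fun o => k == (PySem.List.pyGetD o 0 0, PySem.List.pyGetD o 1 0))) := by
  induction obstacles generalizing d with
  | nil => simp
  | cons o os ih =>
    simp only [List.foldl_cons, List.any_cons]
    rw [ih, PySem.Dict.contains_insert, Bool.or_assoc, Bool.or_left_comm]

lemma pvHit_one_iff (dx dy x y : Int) (o : List Int) (hdir : pvDir dx dy) :
    pvHit dx dy x y o = 1 ↔ (PySem.List.pyGetD o 0 0, PySem.List.pyGetD o 1 0) = (x + dx, y + dy) := by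
  simp only [pvHit, Prod.mk.injEq]
  rcases hdir with ⟨hdx, hdy⟩ | ⟨hdy, hdx⟩
  · subst hdx
    rcases Int.eq_one_or_neg_one_of_mul_eq_one' hdy with ⟨h1, -⟩ | ⟨h1, -⟩ <;> subst h1 <;>
      by_cases hox : PySem.List.pyGetD o 0 0 = x <;>
        simp [hox] <;> omega
  · subst hdy
    rcases Int.eq_one_or_neg_one_of_mul_eq_one' hdx with ⟨h1, -⟩ | ⟨h1, -⟩ <;> subst h1 <;>
      by_cases hoy : PySem.List.pyGetD o 1 0 = y <;>
        simp [hoy] <;> try omega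

lemma pvWalkA_eq (obstacles : List (List Int)) (dx dy : Int) (hdir : pvDir dx dy) :
    ∀ (fuel : Nat) (x y : Int),
      pvWalkA (obstacles.foldl (fun m obstacle =>
          m.insert (PySem.List.pyGetD obstacle 0 0, PySem.List.pyGetD obstacle 1 0) 1) PySem.Dict.empty) dx dy fuel x y =
      (x + dx * pvStepF obstacles dx dy x y (fuel : Int),
       y + dy * pvStepF obstacles dx dy x y (fuel : Int)) := by
  intro fuel
  induction fuel with
  | zero =>
    intro x y
    have h0 : pvStepF obstacles dx dy x y 0 = 0 := by
      unfold pvStepF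
      exact le_antisymm (pvFold_le obstacles dx dy x y 0)
        (pvFold_nonneg obstacles dx dy x y 0 (le_refl 0))
    simp [pvWalkA, h0]
  | succ k ih =>
    intro x y
    simp only [pvWalkA]
    by_cases hmem : (obstacles.foldl (fun m obstacle =>
        m.insert (PySem.List.pyGetD obstacle 0 0, PySem.List.pyGetD obstacle 1 0) 1)
        (PySem.Dict.empty : PySem.Dict (Int × Int) Int)).contains (x + dx, y + dy) = true
    · have hex : ∃ o ∈ obstacles, pvHit dx dy x y o = 1 := by
        simp only [pvContains_fold] at hmem
        simp only [PySem.Dict.contains_empty, Bool.false_or, List.any_eq_true] at hmem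
        rcases hmem with ⟨o, ho, hko⟩
        exact ⟨o, ho, (pvHit_one_iff dx dy x y o hdir).mpr (eq_of_beq hko).symm⟩
      have hs : pvStepF obstacles dx dy x y ((k + 1 : Nat) : Int) = 0 := by
        unfold pvStepF
        exact pvFold_zero_of_hit1 obstacles dx dy x y _ (by positivity) hex
      rw [if_pos hmem, hs]
      simp
    · have hno : ∀ o ∈ obstacles, pvHit dx dy x y o ≠ 1 := by
        simp only [pvContains_fold] at hmem
        simp only [PySem.Dict.contains_empty, Bool.false_or, List.any_eq_true, not_exists] at hmem
        intro o ho h1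
        exact hmem o ⟨ho, by simp [(pvHit_one_iff dx dy x y o hdir).mp h1]⟩
      rw [if_neg hmem, ih (x + dx) (y + dy)]
      have hshift : pvStepF obstacles dx dy (x + dx) (y + dy) ((k : Nat) : Int)
          = pvStepF obstacles dx dy x y ((k + 1 : Nat) : Int) - 1 := by
        unfold pvStepF
        rw [Nat.cast_succ]
        exact pvFold_shift obstacles dx dy x y (k : Int) hdir hno
      rw [hshift]
      rw [Prod.mk.injEq]
      exact ⟨by ring, by ring⟩

lemma pvMove_eq (obstacles : List (List Int)) (dx dy : Int) (hdir : pvDir dx dy) (cmd x y : Int) :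
    pvWalkA (obstacles.foldl (fun m obstacle =>
        m.insert (PySem.List.pyGetD obstacle 0 0, PySem.List.pyGetD obstacle 1 0) 1)
        (PySem.Dict.empty : PySem.Dict (Int × Int) Int)) dx dy cmd.toNat x y =
      ((if 0 < pvStepF obstacles dx dy x y cmd then x + dx * pvStepF obstacles dx dy x y cmd else x),
       (if 0 < pvStepF obstacles dx dy x y cmd then y + dy * pvStepF obstacles dx dy x y cmd else y)) := by
  rw [pvWalkA_eq obstacles dx dy hdir cmd.toNat x y]
  by_cases hc : 0 ≤ cmd
  · rw [Int.toNat_of_nonneg hc]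
    have hnn : 0 ≤ pvStepF obstacles dx dy x y cmd := by
      unfold pvStepF; exact pvFold_nonneg obstacles dx dy x y cmd hc
    by_cases hpos : 0 < pvStepF obstacles dx dy x y cmd
    · rw [if_pos hpos, if_pos hpos]
    · have h0 : pvStepF obstacles dx dy x y cmd = 0 := by omega
      rw [if_neg hpos, if_neg hpos, h0]
      simp
  · have ht : cmd.toNat = 0 := by omega
    have hS0 : pvStepF obstacles dx dy x y ((0 : Nat) : Int) = 0 := by
      unfold pvStepF
      exact le_antisymm (by simpa using pvFold_le obstacles dx dy x y 0)
        (by simpa using pvFold_nonneg obstacles dx dy x y 0 (le_refl 0))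
    have hSc : pvStepF obstacles dx dy x y cmd = cmd := by
      unfold pvStepF; exact pvFold_of_nonpos obstacles dx dy x y cmd (by omega)
    rw [ht, hS0, hSc]
    simp [show ¬ (0 : Int) < cmd from by omega]

lemma pvLoop_eq (obstacles : List (List Int)) :
    ∀ (commands : List Int) (cd x y f : Int), 0 ≤ cd → cd < 4 →
    commands.foldl (fun st command =>
      let (curDir, x, y, furthest) := st
      if command = -1 then (PySem.Int.mod (curDir + 1) 4, x, y, furthest)
      else if command = -2 then (PySem.Int.mod (curDir - 1) 4, x, y, furthest)
      else
        let d := PySem.List.pyGetD ([(0, 1), (1, 0), (0, -1), (-1, 0)] : List (Int × Int)) curDir (0, 0)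
        let p := pvWalkA (obstacles.foldl (fun m obstacle =>
            let xObstacle := PySem.List.pyGetD obstacle 0 0
            let yObstacle := PySem.List.pyGetD obstacle 1 0
            m.insert (xObstacle, yObstacle) 1) PySem.Dict.empty) d.1 d.2 command.toNat x y
        (curDir, p.1, p.2, max furthest (p.1 ^ 2 + p.2 ^ 2))) ((cd, x, y, f) : Int × Int × Int × Int)
    = commands.foldl (fun st command =>
      let (curDir, x, y, furthest) := st
      if command = -1 then (PySem.Int.mod (curDir + 1) 4, x, y, furthest)
      else if command = -2 then (PySem.Int.mod (curDir - 1) 4, x, y, furthest)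
      else
        let d := PySem.List.pyGetD ([(0, 1), (1, 0), (0, -1), (-1, 0)] : List (Int × Int)) curDir (0, 0)
        let step := pvStepF obstacles d.1 d.2 x y command
        let x' := if 0 < step then x + d.1 * step else x
        let y' := if 0 < step then y + d.2 * step else y
        (curDir, x', y', max furthest (x' * x' + y' * y'))) ((cd, x, y, f) : Int × Int × Int × Int) := by
  intro commands
  induction commands with
  | nil => intro cd x y f _ _; rfl
  | cons cmd cmds ih =>
    intro cd x y f hlo hhi
    simp only [List.foldl_cons]
    by_cases h1 : cmd = -1
    · simp only [h1, if_pos]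
      exact ih _ _ _ _ (PySem.Int.mod_nonneg _ (by norm_num)) (PySem.Int.mod_lt _ (by norm_num))
    · by_cases h2 : cmd = -2
      · simp only [h2, if_neg (by decide : ¬ ((-2 : Int) = -1)), if_pos]
        exact ih _ _ _ _ (PySem.Int.mod_nonneg _ (by norm_num)) (PySem.Int.mod_lt _ (by norm_num))
      · simp only [if_neg h1, if_neg h2]
        have hdir : pvDir (PySem.List.pyGetD ([(0, 1), (1, 0), (0, -1), (-1, 0)] : List (Int × Int)) cd (0, 0)).1
            (PySem.List.pyGetD ([(0, 1), (1, 0), (0, -1), (-1, 0)] : List (Int × Int)) cd (0, 0)).2 := by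
          interval_cases cd <;> (unfold pvDir; decide)
        rw [pvMove_eq obstacles _ _ hdir cmd x y]
        have htup : ∀ (a b : Int),
            ((cd, a, b, max f (a ^ 2 + b ^ 2)) : Int × Int × Int × Int)
              = (cd, a, b, max f (a * a + b * b)) := by
          intro a b; rw [pow_two, pow_two]
        rw [htup]
        exact ih _ _ _ _ hlo hhi

-- the one loop of Source B that fills both dicts is two independent dict-building loops
lemma pvGroup_split (obstacles : List (List Int)) (a b : PySem.Dict Int (List Int)) :
    obstacles.foldl (fun g obstacle =>
      (g.1.modify (PySem.List.pyGetD obstacle 0 0) [] (· ++ [PySem.List.pyGetD obstacle 1 0]),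
       g.2.modify (PySem.List.pyGetD obstacle 1 0) [] (· ++ [PySem.List.pyGetD obstacle 0 0]))) (a, b)
    = (obstacles.foldl (fun g o => g.modify (PySem.List.pyGetD o 0 0) [] (· ++ [PySem.List.pyGetD o 1 0])) a,
       obstacles.foldl (fun g o => g.modify (PySem.List.pyGetD o 1 0) [] (· ++ [PySem.List.pyGetD o 0 0])) b) :=
  PySem.List.foldl_prod_mk
    (fun g o => g.modify (PySem.List.pyGetD o 0 0) [] (· ++ [PySem.List.pyGetD o 1 0]))
    (fun g o => g.modify (PySem.List.pyGetD o 1 0) [] (· ++ [PySem.List.pyGetD o 0 0])) obstacles a b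

lemma pvGetD_group (obstacles : List (List Int)) (k1 k2 : List Int → Int) (q : Int) :
    (obstacles.foldl (fun g o => g.modify (k1 o) [] (· ++ [k2 o]))
        (PySem.Dict.empty : PySem.Dict Int (List Int))).getD q []
    = ((obstacles.map (fun o => (k1 o, k2 o))).filter (fun p => p.1 == q)).map (·.2) := by
  have h1 : obstacles.foldl (fun g o => g.modify (k1 o) [] (· ++ [k2 o]))
        (PySem.Dict.empty : PySem.Dict Int (List Int))
      = (obstacles.map (fun o => (k1 o, k2 o))).foldl (fun g p => g.modify p.1 [] (· ++ [p.2]))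
        PySem.Dict.empty := by
    rw [List.foldl_map]
  rw [h1, PySem.Dict.getD_foldl_modify_append]
  simp

lemma pvScan_group (obstacles : List (List Int)) (k1 k2 : List Int → Int) (q : Int)
    (f : Int → Int → Int) (c : Int) :
    (((obstacles.map (fun o => (k1 o, k2 o))).filter (fun p => p.1 == q)).map (·.2)).foldl f c
    = obstacles.foldl (fun step o => if k1 o = q then f step (k2 o) else step) c := by
  induction obstacles generalizing c with
  | nil => rfl
  | cons o os ih =>
    simp only [List.map_cons, List.filter_cons]
    by_cases h : k1 o = q
    · simp [h, ih]
    · simp [h, ih]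

-- B's per-command scan of the relevant line equals the guarded scan of all obstacles
lemma pvStep_eq (obstacles : List (List Int)) (dx dy x y c : Int) :
    (if dx = 0 then
      ((obstacles.foldl (fun g obstacle =>
          (g.1.modify (PySem.List.pyGetD obstacle 0 0) [] (· ++ [PySem.List.pyGetD obstacle 1 0]),
           g.2.modify (PySem.List.pyGetD obstacle 1 0) [] (· ++ [PySem.List.pyGetD obstacle 0 0])))
          ((PySem.Dict.empty, PySem.Dict.empty) :
            PySem.Dict Int (List Int) × PySem.Dict Int (List Int))).1.getD x []).foldl
        (fun step oy => if 1 ≤ (oy - y) * dy ∧ (oy - y) * dy - 1 < step then (oy - y) * dy - 1 else step) c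
    else
      ((obstacles.foldl (fun g obstacle =>
          (g.1.modify (PySem.List.pyGetD obstacle 0 0) [] (· ++ [PySem.List.pyGetD obstacle 1 0]),
           g.2.modify (PySem.List.pyGetD obstacle 1 0) [] (· ++ [PySem.List.pyGetD obstacle 0 0])))
          ((PySem.Dict.empty, PySem.Dict.empty) :
            PySem.Dict Int (List Int) × PySem.Dict Int (List Int))).2.getD y []).foldl
        (fun step ox => if 1 ≤ (ox - x) * dx ∧ (ox - x) * dx - 1 < step then (ox - x) * dx - 1 else step) c)
    = pvStepF obstacles dx dy x y c := by
  rw [pvGroup_split]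
  by_cases hdx : dx = 0
  · rw [if_pos hdx]
    dsimp only
    rw [pvGetD_group obstacles (fun o => PySem.List.pyGetD o 0 0) (fun o => PySem.List.pyGetD o 1 0) x,
      pvScan_group]
    unfold pvStepF
    congr 1
    funext step o
    simp only [pvHit, hdx, if_true]
    by_cases hox : PySem.List.pyGetD o 0 0 = x <;> simp [hox]
  · rw [if_neg hdx]
    dsimp only
    rw [pvGetD_group obstacles (fun o => PySem.List.pyGetD o 1 0) (fun o => PySem.List.pyGetD o 0 0) y,
      pvScan_group]
    unfold pvStepF
    congr 1
    funext step o
    simp only [pvHit, hdx, if_false]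
    by_cases hoy : PySem.List.pyGetD o 1 0 = y <;> simp [hoy]

-- the dict-scanning loop of B computes the same states as the guarded-scan loop
lemma pvAlt_eq (commands : List Int) (obstacles : List (List Int)) :
    robotSim_Refactoring_alt commands obstacles
    = (commands.foldl (fun st command =>
        let (curDir, x, y, furthest) := st
        if command = -1 then (PySem.Int.mod (curDir + 1) 4, x, y, furthest)
        else if command = -2 then (PySem.Int.mod (curDir - 1) 4, x, y, furthest)
        else
          let d := PySem.List.pyGetD ([(0, 1), (1, 0), (0, -1), (-1, 0)] : List (Int × Int)) curDir (0, 0)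
          let step := pvStepF obstacles d.1 d.2 x y command
          let x' := if 0 < step then x + d.1 * step else x
          let y' := if 0 < step then y + d.2 * step else y
          (curDir, x', y', max furthest (x' * x' + y' * y'))) ((0, 0, 0, 0) : Int × Int × Int × Int)).2.2.2 := by
  simp only [robotSim_Refactoring_alt]
  apply congrArg (fun s : Int × Int × Int × Int => s.2.2.2)
  congr 1
  funext st command
  obtain ⟨cd, x, y, f⟩ := st
  dsimp only
  by_cases h1 : command = -1
  · simp [h1]
  · by_cases h2 : command = -2
    · simp [h1, h2]
    · simp only [if_neg h1, if_neg h2]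
      rw [pvStep_eq]

-- ===== VERDICT (by name: the statement is the Claim_ definition above) =====
theorem robotSim_Refactoring_spec : Claim_equal_robotSim_Refactoring := by
  intro commands obstacles hdom hpre
  unfold Spec_robotSim_Refactoring
  rw [pvAlt_eq]
  simp only [robotSim_Refactoring]
  exact congrArg (fun s => s.2.2.2) (pvLoop_eq obstacles commands 0 0 0 0 (by norm_num) (by norm_num))
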